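-- pv_equiv track=rewrite | github.com/maxbergmark/old-work | Egna projekt/Tetris/newtetris.py | calcHoles2
-- ===== SOURCE A (Python) =====
-- def calcHoles2(matrix):
--     holes = 0
--
--     for i in range(len(matrix[0])):
--         first = False
--         for j in range(1, len(matrix)):
--             if matrix[j][i] != 'black' and not first:
--                 first = True
--             elif matrix[j][i] == 'black' and first:
--                 holes += 1
--
--     #self.printMatrix(matrix)
--
--     return holes
-- ===== SOURCE B (Python) =====
-- def calcHoles2(matrix):
--     holes = 0
--     for i in range(len(matrix[0])):
--         col = [row[i] for row in matrix[1:]]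
--         k = 0
--         while k < len(col) and col[k] == 'black':
--             k += 1
--         holes += col[k:].count('black')
--     return holes
-- ===== Notes on version B (the rewrite author's own statement) =====
-- stated objective: alternative
-- what changed: Replaces A's stateful flag scan per column (a 'first' boolean toggled once, then conditional counting) with a two-phase decomposition: materialise the column below row 0, skip its leading run of 'black' cells to the first non-black boundary, then count 'black' in the remaining suffix.
import Mathlib
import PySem

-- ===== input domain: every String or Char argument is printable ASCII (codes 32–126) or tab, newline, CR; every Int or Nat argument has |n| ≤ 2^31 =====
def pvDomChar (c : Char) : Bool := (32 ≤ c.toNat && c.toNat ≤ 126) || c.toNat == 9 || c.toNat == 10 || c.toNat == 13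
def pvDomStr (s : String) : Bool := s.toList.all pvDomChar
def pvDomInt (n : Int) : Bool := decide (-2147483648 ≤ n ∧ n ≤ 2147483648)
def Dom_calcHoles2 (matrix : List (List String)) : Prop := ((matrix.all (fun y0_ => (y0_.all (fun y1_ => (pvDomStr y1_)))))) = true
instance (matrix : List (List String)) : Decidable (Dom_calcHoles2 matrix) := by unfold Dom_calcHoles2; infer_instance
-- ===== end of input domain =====

-- B replaces A's stateful flag scan per column by "skip leading blacks, then count blacks"; same cost, different decomposition.
-- ===== PORT A =====
-- A: for each column i, a `first` flag set at the first non-black cell (rows 1..),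
-- after which every black cell counts as a hole.
def calcHoles2 (matrix : List (List String)) : Int :=
  (List.range (matrix.headD []).length).foldl (fun holes i =>
    ((List.range' 1 (matrix.length - 1)).foldl
      (fun (st : Int × Bool) j =>
        if (matrix.getD j []).getD i "" ≠ "black" ∧ ¬ st.2 then (st.1, true)
        else if (matrix.getD j []).getD i "" = "black" ∧ st.2 then (st.1 + 1, st.2)
        else st)
      (holes, false)).1) 0

-- ===== PORT B =====
-- port of Source B's `while k < len(col) and col[k] == 'black': k += 1` followed by `col[k:]`
def skipBlack : List String → List String
  | [] => []
  | c :: rest => if c = "black" then skipBlack rest else c :: rest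

def calcHoles2_alt (matrix : List (List String)) : Int :=
  (List.range (matrix.headD []).length).foldl (fun holes i =>
    holes + ((skipBlack ((matrix.drop 1).map (fun row => row.getD i ""))).countP
      (fun c => c == "black") : Int)) 0

-- ===== PRECONDITION & SPEC =====
-- Pre_ excludes exactly the inputs where Python A raises IndexError:
-- the empty matrix (matrix[0]) and ragged matrices where some row below the
-- first is shorter than row 0 (matrix[j][i]).
def Pre_calcHoles2 (matrix : List (List String)) : Prop :=
  matrix ≠ [] ∧ ∀ row ∈ matrix.drop 1, (matrix.headD []).length ≤ row.length

instance (matrix : List (List String)) : Decidable (Pre_calcHoles2 matrix) := by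
  unfold Pre_calcHoles2; infer_instance

def pvWitness_calcHoles2 : List (List String) :=
  [["a", "b"], ["black", "x"], ["x", "black"]]

def Spec_calcHoles2 (matrix : List (List String)) (out : Int) : Prop := out = calcHoles2_alt matrix
instance (matrix : List (List String)) (out : Int) : Decidable (Spec_calcHoles2 matrix out) := by unfold Spec_calcHoles2; infer_instance

-- ===== CLAIM (what is proved, stated in full; the proofs are below) =====
def Claim_equal_calcHoles2 : Prop := ∀ (matrix : List (List String)), Dom_calcHoles2 matrix → Pre_calcHoles2 matrix → Spec_calcHoles2 matrix (calcHoles2 matrix)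

-- ===== LEMMAS AND PROOFS =====

-- the body of A's inner loop, named for the proofs (definitionally equal to the port's lambda)
def pvStep (st : Int × Bool) (c : String) : Int × Bool :=
  if c ≠ "black" ∧ ¬ st.2 then (st.1, true)
  else if c = "black" ∧ st.2 then (st.1 + 1, st.2)
  else st

-- A fold over range' s t.length reading l.getD equals a fold over the suffix t = l.drop s.
lemma pvFoldlRange'GetD {α β : Type} (f : β → α → β) (d : α) (l : List α) :
    ∀ (t : List α) (s : ℕ) (b : β), l.drop s = t →
      (List.range' s t.length).foldl (fun st j => f st (l.getD j d)) b = t.foldl f b := by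
  intro t
  induction t with
  | nil => intro s b _; simp
  | cons x xs ih =>
    intro s b hdrop
    have h1 : l[s]? = some x := by rw [← List.head?_drop, hdrop]; rfl
    have hx : l.getD s d = x := by simp [List.getD_eq_getElem?_getD, h1]
    have hdrop' : l.drop (s + 1) = xs := by
      have h2 : (l.drop s).drop 1 = l.drop (s + 1) := by rw [List.drop_drop]
      rw [← h2, hdrop]; simp
    rw [List.length_cons, List.range'_succ, List.foldl_cons, List.foldl_cons, hx]
    exact ih (s + 1) (f b x) hdrop'

lemma pvStep_true_black (h : Int) : pvStep (h, true) "black" = (h + 1, true) := by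
  simp [pvStep]

lemma pvStep_true_other (h : Int) (c : String) (hc : c ≠ "black") :
    pvStep (h, true) c = (h, true) := by
  simp [pvStep, hc]

lemma pvStep_false_black (h : Int) : pvStep (h, false) "black" = (h, false) := by
  simp [pvStep]

lemma pvStep_false_other (h : Int) (c : String) (hc : c ≠ "black") :
    pvStep (h, false) c = (h, true) := by
  simp [pvStep, hc]

-- A's inner scan with the flag already true counts every black cell.
lemma pvFoldTrue (col : List String) : ∀ (h : Int),
    (col.foldl pvStep (h, true)).1 = h + (col.countP (fun c => c == "black") : Int) := by
  induction col with
  | nil => intro h; simp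
  | cons c cs ih =>
    intro h
    rw [List.foldl_cons]
    by_cases hc : c = "black"
    · rw [hc, pvStep_true_black, ih, List.countP_cons]
      simp
      ring
    · rw [pvStep_true_other h c hc, ih, List.countP_cons]
      simp [hc]

-- A's inner scan from flag = false counts the black cells after the leading black run.
lemma pvFoldFalse (col : List String) : ∀ (h : Int),
    (col.foldl pvStep (h, false)).1
      = h + ((skipBlack col).countP (fun c => c == "black") : Int) := by
  induction col with
  | nil => intro h; simp [skipBlack]
  | cons c cs ih =>
    intro h
    rw [List.foldl_cons]
    by_cases hc : c = "black"
    · rw [hc, pvStep_false_black, ih]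
      simp [skipBlack]
    · rw [pvStep_false_other h c hc]
      have hsb : skipBlack (c :: cs) = c :: cs := by simp [skipBlack, hc]
      rw [pvFoldTrue, hsb, List.countP_cons]
      simp [hc]

-- ===== VERDICT (by name: the statement is the Claim_ definition above) =====
theorem calcHoles2_spec : Claim_equal_calcHoles2 := by
  intro matrix _ _
  unfold Spec_calcHoles2 calcHoles2 calcHoles2_alt
  show List.foldl (fun holes i =>
      ((List.range' 1 (matrix.length - 1)).foldl
        (fun (st : Int × Bool) j => pvStep st ((matrix.getD j []).getD i "")) (holes, false)).1)
      0 (List.range (matrix.headD []).length)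
    = List.foldl (fun holes i =>
        holes + ((skipBlack ((matrix.drop 1).map (fun row => row.getD i ""))).countP
          (fun c => c == "black") : Int))
      0 (List.range (matrix.headD []).length)
  refine congrArg (fun f => List.foldl f (0 : Int) (List.range (matrix.headD []).length)) ?_
  funext holes i
  have hlen : (matrix.drop 1).length = matrix.length - 1 := by simp
  rw [show (matrix.length - 1) = (matrix.drop 1).length from hlen.symm]
  rw [pvFoldlRange'GetD
        (fun (st : Int × Bool) row => pvStep st (row.getD i ""))
        [] matrix (matrix.drop 1) 1 (holes, false) rfl]
  rw [← List.foldl_map]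
  exact pvFoldFalse _ holes
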